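-- pv_equiv track=rewrite | github.com/GFV450/Tweet-Generator | StochasticSampling.py | getWord
-- ===== SOURCE A (Python) =====
-- def getWord(histogram, totalWords, randomWord):
--     counter = 0
--
--     # 'for' loop that iterates through the histogram looking for the random word
--     for key, value in histogram.items():
--         # Adds the value of the current word
--         counter += value
--
--         # Conditional to define if the value of the current word
--         # corresponds to the random word selected
--         if counter >= randomWord:
--             word = key
--             break
--
--     return word
-- ===== SOURCE B (Python) =====
-- def getWord(histogram, totalWords, randomWord):
--     # Precompute keys and running cumulative sums, then binary-search
--     # (bisect_left by hand, since A imports no modules) for the first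
--     # cumulative sum >= randomWord.
--     keys = list(histogram)
--     cums = []
--     c = 0
--     for v in histogram.values():
--         c += v
--         cums.append(c)
--     lo, hi = 0, len(cums)
--     while lo < hi:
--         mid = (lo + hi) // 2
--         if cums[mid] < randomWord:
--             lo = mid + 1
--         else:
--             hi = mid
--     return keys[lo]
-- ===== Notes on version B (the rewrite author's own statement) =====
-- stated objective: alternative
-- what changed: B precomputes the key list and the cumulative-sum list in one pass and then binary-searches (hand-written bisect_left) for the first cumulative sum >= randomWord, instead of A's single scan with a running counter and early break.
-- outside the precondition, e.g. on getWord({'a': 5, 'b': -4, 'c': 10}, 11, 2): A returns 'a', B returns 'c'; on getWord({'a': 1}, 1, 5): A raises NameError, B raises IndexError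
import Mathlib
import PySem

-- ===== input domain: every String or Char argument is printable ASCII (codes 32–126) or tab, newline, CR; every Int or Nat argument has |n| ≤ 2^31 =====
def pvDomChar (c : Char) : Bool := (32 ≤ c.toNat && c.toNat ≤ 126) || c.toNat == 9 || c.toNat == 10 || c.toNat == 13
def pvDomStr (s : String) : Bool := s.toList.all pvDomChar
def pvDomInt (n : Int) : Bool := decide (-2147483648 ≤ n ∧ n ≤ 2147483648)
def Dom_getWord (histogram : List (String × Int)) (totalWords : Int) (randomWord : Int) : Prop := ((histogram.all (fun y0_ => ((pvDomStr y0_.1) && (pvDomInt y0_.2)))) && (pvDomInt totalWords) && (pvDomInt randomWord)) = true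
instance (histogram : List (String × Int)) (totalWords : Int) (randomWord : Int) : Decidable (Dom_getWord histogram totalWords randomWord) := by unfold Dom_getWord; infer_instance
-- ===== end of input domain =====

-- B replaces A's running-counter scan by precomputed cumulative sums plus a hand-written
-- binary search (bisect_left); same result on nonnegative-count histograms where some
-- prefix reaches the threshold (alternative decomposition, not claimed faster).


-- ===== PORT A =====
-- A's for-loop over histogram.items() with running counter and early break;
-- `none` marks the fall-through where Python raises NameError (excluded by Pre_).
def getWordLoop (randomWord : Int) : List (String × Int) → Int → Option String
  | [], _ => none
  | (k, v) :: t, counter =>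
      let c := counter + v
      if randomWord ≤ c then some k else getWordLoop randomWord t c

def getWord (histogram : List (String × Int)) (totalWords : Int) (randomWord : Int) : String :=
  (getWordLoop randomWord histogram 0).getD ""

-- ===== PORT B =====
-- cums.append(c) loop of Source B
def accumVals : List Int → Int → List Int
  | [], _ => []
  | v :: t, c => (c + v) :: accumVals t (c + v)

-- the while-loop of Source B (hand-written bisect_left); mid < hi ≤ cums.length holds
-- throughout, so `getD mid 0` is exactly Python's cums[mid]
def bisectLeft (cums : List Int) (x : Int) (lo hi : Nat) : Nat :=
  if _h : lo < hi then
    let mid := (lo + hi) / 2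
    if cums.getD mid 0 < x then bisectLeft cums x (mid + 1) hi
    else bisectLeft cums x lo mid
  else lo
termination_by hi - lo
decreasing_by all_goals omega

def getWord_alt (histogram : List (String × Int)) (totalWords : Int) (randomWord : Int) : String :=
  let keys := histogram.map Prod.fst
  let cums := accumVals (histogram.map Prod.snd) 0
  let i := bisectLeft cums randomWord 0 cums.length
  -- keys[i]: under Pre_ i < keys.length; i = length is Python's IndexError, excluded by Pre_
  keys.getD i ""

-- ===== PRECONDITION & SPEC =====
-- Pre_ excludes (a) inputs where no prefix sum reaches randomWord, on which A raises
-- NameError (and B raises IndexError), and (b) histograms with a negative count, on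
-- which A still returns a value but B's bisection over the then non-monotone prefix
-- sums may legitimately pick a different crossing (see cites).
def Pre_getWord (histogram : List (String × Int)) (totalWords : Int) (randomWord : Int) : Prop :=
  histogram ≠ [] ∧ (∀ p ∈ histogram, 0 ≤ p.2) ∧ randomWord ≤ (histogram.map Prod.snd).sum
instance (histogram : List (String × Int)) (totalWords : Int) (randomWord : Int) : Decidable (Pre_getWord histogram totalWords randomWord) := by unfold Pre_getWord; infer_instance
def pvWitness_getWord : (List (String × Int)) × Int × Int := ([("the", 2), ("cat", 3)], 5, 4)

def Spec_getWord (histogram : List (String × Int)) (totalWords : Int) (randomWord : Int) (out : String) : Prop := out = getWord_alt histogram totalWords randomWord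
instance (histogram : List (String × Int)) (totalWords : Int) (randomWord : Int) (out : String) : Decidable (Spec_getWord histogram totalWords randomWord out) := by unfold Spec_getWord; infer_instance

-- ===== CLAIM (what is proved, stated in full; the proofs are below) =====
def Claim_equal_getWord : Prop := ∀ (histogram : List (String × Int)) (totalWords : Int) (randomWord : Int), Dom_getWord histogram totalWords randomWord → Pre_getWord histogram totalWords randomWord → Spec_getWord histogram totalWords randomWord (getWord histogram totalWords randomWord)

-- ===== LEMMAS AND PROOFS =====

theorem accumVals_length (l : List Int) (c : Int) : (accumVals l c).length = l.length := by
  induction l generalizing c with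
  | nil => rfl
  | cons v t ih => simp [accumVals, ih]

-- A's loop returns the key at the first index whose cumulative sum reaches the threshold
theorem getWordLoop_eq_findIdx (r : Int) (l : List (String × Int)) (c : Int) :
    getWordLoop r l c =
      (l.map Prod.fst)[(accumVals (l.map Prod.snd) c).findIdx (fun v => decide (r ≤ v))]? := by
  induction l generalizing c with
  | nil => rfl
  | cons p t ih =>
    obtain ⟨k, v⟩ := p
    simp only [getWordLoop, List.map_cons, accumVals, List.findIdx_cons]
    by_cases h : r ≤ c + v
    · simp [h]
    · simp [h, ih]

-- lower bound of all accumulated sums when values are nonnegative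
theorem accumVals_lb (l : List Int) (c : Int) (hnn : ∀ v ∈ l, 0 ≤ v) :
    ∀ x ∈ accumVals l c, c ≤ x := by
  induction l generalizing c with
  | nil => simp [accumVals]
  | cons v t ih =>
    intro x hx
    simp only [accumVals, List.mem_cons] at hx
    have hv : 0 ≤ v := hnn v (by simp)
    rcases hx with rfl | hx
    · omega
    · have := ih (c + v) (fun w hw => hnn w (by simp [hw])) x hx
      omega

theorem accumVals_pairwise (l : List Int) (c : Int) (hnn : ∀ v ∈ l, 0 ≤ v) :
    (accumVals l c).Pairwise (· ≤ ·) := by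
  induction l generalizing c with
  | nil => simp [accumVals]
  | cons v t ih =>
    simp only [accumVals, List.pairwise_cons]
    exact ⟨accumVals_lb t (c + v) (fun w hw => hnn w (by simp [hw])),
           ih (c + v) (fun w hw => hnn w (by simp [hw]))⟩

theorem accumVals_last (l : List Int) (c : Int) (h : l ≠ []) :
    (accumVals l c).getD (l.length - 1) 0 = c + l.sum := by
  induction l generalizing c with
  | nil => exact absurd rfl h
  | cons v t ih =>
    cases t with
    | nil => simp [accumVals]
    | cons w u =>
      have h2 := ih (c + v) (by simp)
      simp only [List.length_cons, Nat.add_sub_cancel] at h2 ⊢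
      simp only [accumVals, List.getD_cons_succ]
      simp only [List.sum_cons] at h2 ⊢
      simp only [accumVals] at h2
      rw [h2]; ring

-- Pairwise (≤) as monotonicity of getD
theorem getD_mono_of_pairwise (cums : List Int) (hmono : cums.Pairwise (· ≤ ·))
    (i j : Nat) (hij : i ≤ j) (hj : j < cums.length) :
    cums.getD i 0 ≤ cums.getD j 0 := by
  have hi : i < cums.length := by omega
  rcases Nat.lt_or_eq_of_le hij with h | h
  · have := (List.pairwise_iff_getElem.mp hmono) i j hi hj h
    simpa [List.getD_eq_getElem?_getD, List.getElem?_eq_getElem hi,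
           List.getElem?_eq_getElem hj] using this
  · rw [h]

-- getD versions of the two findIdx facts
theorem findIdx_hit (cums : List Int) (x : Int)
    (hK : cums.findIdx (fun v => decide (x ≤ v)) < cums.length) :
    x ≤ cums.getD (cums.findIdx (fun v => decide (x ≤ v))) 0 := by
  have h := List.findIdx_getElem (p := fun v => decide (x ≤ v)) (xs := cums) (w := hK)
  simp only [decide_eq_true_eq] at h
  simpa [List.getD_eq_getElem?_getD, List.getElem?_eq_getElem hK] using h

theorem findIdx_miss (cums : List Int) (x : Int) (j : Nat)
    (hj : j < cums.findIdx (fun v => decide (x ≤ v))) (hlen : j < cums.length) :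
    cums.getD j 0 < x := by
  have h := List.not_of_lt_findIdx (p := fun v => decide (x ≤ v)) (xs := cums) hj
  simp only [decide_eq_false_iff_not, not_le] at h
  simpa [List.getD_eq_getElem?_getD, List.getElem?_eq_getElem hlen] using h

-- binary search lands exactly on findIdx when the list is sorted (≤)
theorem bisectLeft_eq_findIdx (cums : List Int) (x : Int)
    (hmono : cums.Pairwise (· ≤ ·)) (lo hi : Nat)
    (h1 : lo ≤ cums.findIdx (fun v => decide (x ≤ v)))
    (h2 : cums.findIdx (fun v => decide (x ≤ v)) ≤ hi)
    (h3 : hi ≤ cums.length) :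
    bisectLeft cums x lo hi = cums.findIdx (fun v => decide (x ≤ v)) := by
  rw [bisectLeft]
  split
  · next hlt =>
    have hmid : (lo + hi) / 2 < hi := by omega
    have hmidlen : (lo + hi) / 2 < cums.length := by omega
    by_cases hc : cums.getD ((lo + hi) / 2) 0 < x
    · simp only [hc, if_true]
      have hmlt : (lo + hi) / 2 < cums.findIdx (fun v => decide (x ≤ v)) := by
        by_contra hle
        push_neg at hle
        have hKlen : cums.findIdx (fun v => decide (x ≤ v)) < cums.length := by omega
        have hp := findIdx_hit cums x hKlen
        have := getD_mono_of_pairwise cums hmono _ _ hle hmidlen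
        omega
      exact bisectLeft_eq_findIdx cums x hmono ((lo + hi) / 2 + 1) hi hmlt h2 h3
    · simp only [hc, if_false]
      have hKle : cums.findIdx (fun v => decide (x ≤ v)) ≤ (lo + hi) / 2 := by
        by_contra hgt
        push_neg at hgt
        have := findIdx_miss cums x _ hgt hmidlen
        omega
      exact bisectLeft_eq_findIdx cums x hmono lo ((lo + hi) / 2) h1 hKle (by omega)
  · next hge => omega
termination_by hi - lo
decreasing_by all_goals omega

-- ===== VERDICT (by name: the statement is the Claim_ definition above) =====
theorem getWord_spec : Claim_equal_getWord := by
  intro histogram totalWords randomWord _hdom hpre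
  obtain ⟨hne, hnn, hsum⟩ := hpre
  unfold Spec_getWord getWord getWord_alt
  set vals := histogram.map Prod.snd with hv
  set keys := histogram.map Prod.fst with hk
  set cums := accumVals vals 0 with hc
  have hnnv : ∀ v ∈ vals, 0 ≤ v := by
    intro v hmem
    rw [hv] at hmem
    obtain ⟨p, hp, rfl⟩ := List.mem_map.mp hmem
    exact hnn p hp
  have hvlen : vals ≠ [] := by simp [hv, hne]
  have hclen : cums.length = vals.length := accumVals_length _ _
  have hlast : cums.getD (vals.length - 1) 0 = vals.sum := by
    simpa using accumVals_last vals 0 hvlen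
  have hlen0 : 0 < vals.length := List.length_pos_iff.mpr hvlen
  have hlastlt : vals.length - 1 < cums.length := by omega
  have hgetlast : cums[vals.length - 1] = vals.sum := by
    have : cums.getD (vals.length - 1) 0 = cums[vals.length - 1] := by
      simp [List.getD_eq_getElem?_getD, List.getElem?_eq_getElem hlastlt]
    omega
  have hKlt : cums.findIdx (fun v => decide (randomWord ≤ v)) < cums.length := by
    apply List.findIdx_lt_length_of_exists
    exact ⟨cums[vals.length - 1], List.getElem_mem _, by simp [hgetlast]; omega⟩
  have hmono : cums.Pairwise (· ≤ ·) := accumVals_pairwise vals 0 hnnv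
  have hbis : bisectLeft cums randomWord 0 cums.length
      = cums.findIdx (fun v => decide (randomWord ≤ v)) :=
    bisectLeft_eq_findIdx cums randomWord hmono 0 cums.length (by omega)
      List.findIdx_le_length (le_refl _)
  have hloop := getWordLoop_eq_findIdx randomWord histogram 0
  rw [← hv, ← hk, ← hc] at hloop
  have hKkeys : cums.findIdx (fun v => decide (randomWord ≤ v)) < keys.length := by
    have : keys.length = vals.length := by simp [hk, hv]
    omega
  rw [hloop]
  show keys[cums.findIdx (fun v => decide (randomWord ≤ v))]?.getD ""
      = keys.getD (bisectLeft cums randomWord 0 cums.length) ""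
  rw [hbis]
  simp [List.getD_eq_getElem?_getD, List.getElem?_eq_getElem hKkeys]
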